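-- pv_equiv track=rewrite | github.com/Tolmeton/Hegemonikon | 20_機構｜Mekhane/_src｜ソースコード/mekhane/symploke/ccl_tree_distance.py | _tokenize_ccl
-- ===== SOURCE A (Python) =====
-- def _tokenize_ccl(ccl_str: str) -> list[str]:
--     """CCL 文字列をトークンに分割する。
--
--     全括弧 `({[]})` を独立トークンとして分離しつつ、
--     `F:[each]{` のような接頭辞付きパターンは「ラベル+開括弧」として保持する。
--     """
--     raw_tokens = ccl_str.split()
--     result = []
--
--     _BRACKETS = set("({})")
--
--     for tok in raw_tokens:
--         if not tok:
--             continue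
--
--         # `>>` `//` はそのまま
--         if tok in (">>", "//"):
--             result.append(tok)
--             continue
--
--         # 単独の括弧
--         if len(tok) == 1 and tok in _BRACKETS:
--             result.append(tok)
--             continue
--
--         # 文字列を走査して括弧を分離
--         buf = ""
--         for ch in tok:
--             if ch in _BRACKETS:
--                 if ch in "({[":
--                     # 開括弧 — prefix があれば `prefix{` として保持
--                     if buf:
--                         result.append(buf + ch)
--                         buf = ""
--                     else:
--                         result.append(ch)
--                 else:  # )}]
--                     if buf:
--                         result.append(buf)
--                         buf = ""
--                     result.append(ch)
--             else:
--                 buf += ch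
--         if buf:
--             result.append(buf)
--
--     return result
-- ===== SOURCE B (Python) =====
-- def _tokenize_ccl(ccl_str: str) -> list[str]:
--     """Split a CCL string into tokens by inserting spaces around the
--     brackets ( { } ) and splitting on whitespace: a space goes on both
--     sides of a closing bracket (it is always its own token) and only
--     after an opening bracket (so a prefix stays attached to it)."""
--     return (ccl_str.replace(")", " ) ")
--                    .replace("}", " } ")
--                    .replace("(", "( ")
--                    .replace("{", "{ ")
--                    .split())
-- ===== Notes on version B (the rewrite author's own statement) =====
-- stated objective: simpler
-- what changed: Replaces A's per-token character scan with a mutable buffer and special cases by a single replace-then-split pipeline: insert spaces on both sides of ) and }, after ( and {, then str.split(); no per-character loop, no special cases.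
import Mathlib
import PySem

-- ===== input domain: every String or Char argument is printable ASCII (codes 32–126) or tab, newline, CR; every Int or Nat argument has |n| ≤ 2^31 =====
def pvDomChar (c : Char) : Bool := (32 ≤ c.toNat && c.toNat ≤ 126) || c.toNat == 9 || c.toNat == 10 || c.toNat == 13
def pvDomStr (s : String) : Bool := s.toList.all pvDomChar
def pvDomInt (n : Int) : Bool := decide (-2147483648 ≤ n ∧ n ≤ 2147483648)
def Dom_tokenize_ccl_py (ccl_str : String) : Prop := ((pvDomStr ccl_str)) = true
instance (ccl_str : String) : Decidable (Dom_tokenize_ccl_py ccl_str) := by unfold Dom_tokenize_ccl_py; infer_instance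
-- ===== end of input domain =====

-- B replaces A's per-token character scan (buffer + special cases) by a replace-then-split
-- pipeline; equivalence of return values is proved for every string (objective: simpler).

-- ===== PORT A =====
-- _BRACKETS = set("({})")  (membership only, so the order is irrelevant)
def pvBrackets : List Char := ['(', '{', '}', ')']

-- the body of A's inner `for ch in tok` loop; state = (result, buf)
def tokAStep (st : List (List Char) × List Char) (ch : Char) : List (List Char) × List Char :=
  if ch ∈ pvBrackets then
    if ch ∈ ['(', '{', '['] then            -- `ch in "({["`
      if st.2 ≠ [] then (st.1 ++ [st.2 ++ [ch]], [])   -- result.append(buf + ch); buf = ""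
      else (st.1 ++ [[ch]], [])                         -- result.append(ch)
    else                                     -- `)}]`
      ((if st.2 ≠ [] then st.1 ++ [st.2] else st.1) ++ [[ch]], [])
  else (st.1, st.2 ++ [ch])                  -- buf += ch

-- the body of A's outer `for tok in raw_tokens` loop
def tokA (result : List (List Char)) (tok : List Char) : List (List Char) :=
  if tok = [] then result                                   -- if not tok: continue
  else if tok = ['>', '>'] ∨ tok = ['/', '/'] then result ++ [tok]
  else if tok.length = 1 ∧ tok ∈ [['('], ['{'], ['}'], [')']] then result ++ [tok]
  else
    let st := tok.foldl tokAStep (result, [])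
    if st.2 ≠ [] then st.1 ++ [st.2] else st.1              -- if buf: result.append(buf)

def tokenize_ccl_py (ccl_str : String) : List String :=
  ((PySem.Chars.split₀ ccl_str.toList).foldl tokA []).map String.ofList

-- ===== PORT B =====
def tokenize_ccl_py_alt (ccl_str : String) : List String :=
  PySem.Str.split₀
    (PySem.Str.replace
      (PySem.Str.replace
        (PySem.Str.replace
          (PySem.Str.replace ccl_str ")" " ) ")
          "}" " } ")
        "(" "( ")
      "{" "{ ")

-- ===== PRECONDITION & SPEC =====
def Spec_tokenize_ccl_py (ccl_str : String) (out : List String) : Prop := out = tokenize_ccl_py_alt ccl_str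
instance (ccl_str : String) (out : List String) : Decidable (Spec_tokenize_ccl_py ccl_str out) := by unfold Spec_tokenize_ccl_py; infer_instance

-- ===== CLAIM (what is proved, stated in full; the proofs are below) =====
def Claim_equal_tokenize_ccl_py : Prop := ∀ (ccl_str : String), Dom_tokenize_ccl_py ccl_str → Spec_tokenize_ccl_py ccl_str (tokenize_ccl_py ccl_str)

-- ===== LEMMAS AND PROOFS =====

-- per-character effect of B's four replaces, fused
def pvF (c : Char) : List Char :=
  if c = ')' then [' ', ')', ' ']
  else if c = '}' then [' ', '}', ' ']
  else if c = '(' then ['(', ' ']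
  else if c = '{' then ['{', ' ']
  else [c]

def pvFlush (res : List (List Char)) (buf : List Char) : List (List Char) :=
  if buf = [] then res else res ++ [buf]

-- the common one-pass machine both sides are reduced to
def pvM : List Char → List (List Char) → List Char → List (List Char)
  | [], res, buf => pvFlush res buf
  | c :: s, res, buf =>
    if PySem.Chars.isspace c then pvM s (pvFlush res buf) []
    else if c = ')' ∨ c = '}' then pvM s (pvFlush res buf ++ [[c]]) []
    else if c = '(' ∨ c = '{' then pvM s (res ++ [buf ++ [c]]) []
    else pvM s res (buf ++ [c])

def pvScan (t : List Char) : List (List Char) :=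
  pvFlush (t.foldl tokAStep ([], [])).1 (t.foldl tokAStep ([], [])).2

theorem pvFlush_append (res : List (List Char)) (buf : List Char) :
    pvFlush res buf = res ++ pvFlush [] buf := by
  simp only [pvFlush]; split <;> simp

theorem pvM_prefix (s : List Char) : ∀ res buf, pvM s res buf = res ++ pvM s [] buf := by
  induction s with
  | nil => intro res buf; simpa [pvM] using pvFlush_append res buf
  | cons c s ih =>
    intro res buf
    simp only [pvM]
    split_ifs with h1 h2 h3
    · rw [ih (pvFlush res buf) [], ih (pvFlush [] buf) [], pvFlush_append res buf]
      simp
    · rw [ih (pvFlush res buf ++ [[c]]) [], ih (pvFlush [] buf ++ [[c]]) [],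
        pvFlush_append res buf]
      simp
    · rw [ih (res ++ [buf ++ [c]]) [], ih ([] ++ [buf ++ [c]]) []]
      simp
    · exact ih res (buf ++ [c])

theorem tokAStep_prefix (t : List Char) : ∀ res buf,
    t.foldl tokAStep (res, buf) =
      (res ++ (t.foldl tokAStep ([], buf)).1, (t.foldl tokAStep ([], buf)).2) := by
  induction t with
  | nil => intro res buf; simp
  | cons c t ih =>
    intro res buf
    have hstep : tokAStep (res, buf) c =
        (res ++ (tokAStep ([], buf) c).1, (tokAStep ([], buf) c).2) := by
      simp only [tokAStep]; split_ifs <;> simp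
    simp only [List.foldl_cons, hstep]
    rcases h : tokAStep ([], buf) c with ⟨r1, b1⟩
    rw [ih (res ++ r1) b1, ih r1 b1]
    simp

theorem pvScan_lit : ∀ t ∈ [['>', '>'], ['/', '/'], ['('], ['{'], ['}'], [')']],
    pvScan t = [t] := by decide

theorem tokA_eq (res : List (List Char)) (t : List Char) : tokA res t = res ++ pvScan t := by
  by_cases h0 : t = []
  · subst h0; simp [tokA, pvScan, pvFlush]
  by_cases h1 : t = ['>', '>'] ∨ t = ['/', '/']
  · have hs : pvScan t = [t] := by
      rcases h1 with h1 | h1 <;> subst h1 <;> exact pvScan_lit _ (by simp)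
    rw [hs]
    simp only [tokA, if_neg h0, if_pos h1]
  by_cases h2 : t.length = 1 ∧ t ∈ [['('], ['{'], ['}'], [')']]
  · have hm := h2.2
    have hs : pvScan t = [t] := by
      simp only [List.mem_cons, List.not_mem_nil, or_false] at hm
      rcases hm with h | h | h | h <;> subst h <;> decide
    rw [hs]
    simp only [tokA, if_neg h0, if_neg h1, if_pos h2]
  · simp only [tokA, if_neg h0, if_neg h1, if_neg h2, pvScan, pvFlush]
    rw [tokAStep_prefix t res []]
    split <;> simp_all

theorem foldl_tokA (L : List (List Char)) : ∀ acc, L.foldl tokA acc = acc ++ L.flatMap pvScan := by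
  induction L with
  | nil => intro acc; simp
  | cons t L ih => intro acc; simp [List.foldl_cons, tokA_eq, ih, List.flatMap_cons]

-- one nonspace character moves pvM by exactly one tokAStep
theorem pvM_step (s : List Char) (res : List (List Char)) (buf : List Char) (c : Char)
    (hc : PySem.Chars.isspace c = false) :
    pvM (c :: s) res buf = pvM s (tokAStep (res, buf) c).1 (tokAStep (res, buf) c).2 := by
  by_cases h1 : c = ')'
  · subst h1; by_cases hb : buf = [] <;> simp [pvM, tokAStep, pvBrackets, pvFlush, hc, hb]
  by_cases h2 : c = '}'
  · subst h2; by_cases hb : buf = [] <;> simp [pvM, tokAStep, pvBrackets, pvFlush, hc, hb]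
  by_cases h3 : c = '('
  · subst h3; by_cases hb : buf = [] <;> simp [pvM, tokAStep, pvBrackets, hc, hb]
  by_cases h4 : c = '{'
  · subst h4; by_cases hb : buf = [] <;> simp [pvM, tokAStep, pvBrackets, hc, hb]
  · have hb : c ∉ pvBrackets := by simp [pvBrackets, h1, h2, h3, h4]
    simp [pvM, tokAStep, hc, h1, h2, h3, h4, hb]

theorem pvM_space (s : List Char) (res : List (List Char)) (buf : List Char) (c : Char)
    (hc : PySem.Chars.isspace c = true) :
    pvM (c :: s) res buf = pvFlush res buf ++ pvM s [] [] := by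
  simp only [pvM, hc, if_true]
  exact pvM_prefix s (pvFlush res buf) []

-- ===== A-side: split₀-then-scan equals the machine =====
theorem split₀_go_scan (s : List Char) : ∀ cur acc,
    (PySem.Chars.split₀.go s cur acc).flatMap pvScan =
      acc.reverse.flatMap pvScan ++
        pvM s (cur.reverse.foldl tokAStep ([], [])).1 (cur.reverse.foldl tokAStep ([], [])).2 := by
  induction s with
  | nil =>
    intro cur acc
    rw [show PySem.Chars.split₀.go [] cur acc
        = if cur.isEmpty then acc.reverse else (cur.reverse :: acc).reverse from rfl]
    by_cases hcur : cur = []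
    · subst hcur; simp [pvM, pvFlush]
    · rw [if_neg (by simpa using hcur)]
      rw [show pvM [] (cur.reverse.foldl tokAStep ([], [])).1
            (cur.reverse.foldl tokAStep ([], [])).2 = pvScan cur.reverse from rfl]
      simp
  | cons c s ih =>
    intro cur acc
    rw [show PySem.Chars.split₀.go (c :: s) cur acc
        = if PySem.Chars.isspace c then
            (if cur.isEmpty then PySem.Chars.split₀.go s [] acc
             else PySem.Chars.split₀.go s [] (cur.reverse :: acc))
          else PySem.Chars.split₀.go s (c :: cur) acc from rfl]
    by_cases hc : PySem.Chars.isspace c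
    · rw [if_pos hc, pvM_space s _ _ c hc]
      rw [show pvFlush (cur.reverse.foldl tokAStep ([], [])).1
            (cur.reverse.foldl tokAStep ([], [])).2 = pvScan cur.reverse from rfl]
      by_cases hcur : cur = []
      · subst hcur
        simp only [List.isEmpty_nil, if_true]
        rw [ih [] acc]
        simp [pvScan, pvFlush]
      · rw [if_neg (by simpa using hcur), ih [] (cur.reverse :: acc)]
        simp [List.append_assoc]
    · rw [if_neg hc, ih (c :: cur) acc,
        pvM_step s _ _ c (by simpa using hc)]
      simp [List.foldl_append]

-- ===== B-side: the fused replace is a flatMap =====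
theorem replace_go_single (a : Char) (new : List Char) :
    ∀ (l : List Char) (fuel : Nat) (acc : List Char), l.length ≤ fuel →
      PySem.Chars.replace.go [a] new fuel l acc =
        acc.reverse ++ l.flatMap (fun c => if c = a then new else [c]) := by
  intro l
  induction l with
  | nil => intro fuel acc h; cases fuel <;> simp [PySem.Chars.replace.go]
  | cons c t ih =>
    intro fuel acc h
    cases fuel with
    | zero => simp at h
    | succ f =>
      simp only [PySem.Chars.replace.go]
      by_cases hca : c = a
      · subst hca
        rw [if_pos (by simp [List.isPrefixOf])]
        rw [show List.drop [c].length (c :: t) = t from rfl]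
        rw [ih f (new.reverse ++ acc) (by simpa using Nat.le_of_succ_le_succ h)]
        simp
      · rw [if_neg (by simp [List.isPrefixOf]; exact fun h' => hca h'.symm)]
        rw [ih f (c :: acc) (by simpa using Nat.le_of_succ_le_succ h)]
        simp [hca]

theorem replace_single (s : List Char) (a : Char) (new : List Char) :
    PySem.Chars.replace s [a] new = s.flatMap (fun c => if c = a then new else [c]) := by
  rw [show PySem.Chars.replace s [a] new
      = PySem.Chars.replace.go [a] new s.length s [] from rfl]
  exact replace_go_single a new s s.length [] le_rfl

theorem rep4_eq_flatMap (s : List Char) :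
    PySem.Chars.replace
      (PySem.Chars.replace
        (PySem.Chars.replace
          (PySem.Chars.replace s [')'] [' ', ')', ' ']) ['}'] [' ', '}', ' '])
        ['('] ['(', ' ']) ['{'] ['{', ' '] = s.flatMap pvF := by
  simp only [replace_single, List.flatMap_assoc]
  apply List.flatMap_congr
  intro c _
  by_cases h1 : c = ')'
  · subst h1; decide
  by_cases h2 : c = '}'
  · subst h2; decide
  by_cases h3 : c = '('
  · subst h3; decide
  by_cases h4 : c = '{'
  · subst h4; decide
  · simp [pvF, h1, h2, h3, h4]

-- ===== B-side: split₀ of the expanded string equals the machine =====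
theorem go_nil (cur : List Char) (acc : List (List Char)) :
    PySem.Chars.split₀.go [] cur acc
      = if cur.isEmpty then acc.reverse else (cur.reverse :: acc).reverse := rfl

theorem go_space (c : Char) (hc : PySem.Chars.isspace c = true) (rest cur : List Char)
    (acc : List (List Char)) :
    PySem.Chars.split₀.go (c :: rest) cur acc
      = PySem.Chars.split₀.go rest [] (if cur = [] then acc else cur.reverse :: acc) := by
  rw [show PySem.Chars.split₀.go (c :: rest) cur acc
      = if PySem.Chars.isspace c then
          (if cur.isEmpty then PySem.Chars.split₀.go rest [] acc
           else PySem.Chars.split₀.go rest [] (cur.reverse :: acc))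
        else PySem.Chars.split₀.go rest (c :: cur) acc from rfl, if_pos hc]
  rcases cur <;> simp

theorem go_char (c : Char) (hc : PySem.Chars.isspace c = false) (rest cur : List Char)
    (acc : List (List Char)) :
    PySem.Chars.split₀.go (c :: rest) cur acc
      = PySem.Chars.split₀.go rest (c :: cur) acc := by
  rw [show PySem.Chars.split₀.go (c :: rest) cur acc
      = if PySem.Chars.isspace c then
          (if cur.isEmpty then PySem.Chars.split₀.go rest [] acc
           else PySem.Chars.split₀.go rest [] (cur.reverse :: acc))
        else PySem.Chars.split₀.go rest (c :: cur) acc from rfl, hc]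
  simp

theorem split₀_go_flatMap (s : List Char) : ∀ cur acc,
    PySem.Chars.split₀.go (s.flatMap pvF) cur acc = pvM s acc.reverse cur.reverse := by
  induction s with
  | nil =>
    intro cur acc
    rcases cur <;> simp [go_nil, pvM, pvFlush]
  | cons c s ih =>
    intro cur acc
    by_cases h1 : c = ')'
    · subst h1
      rw [show ((')' :: s).flatMap pvF) = ' ' :: ')' :: ' ' :: s.flatMap pvF from by
            simp [pvF], go_space ' ' (by decide), go_char ')' (by decide),
          go_space ' ' (by decide), if_neg (by simp), ih]
      by_cases hcur : cur = [] <;>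
        simp [pvM, pvFlush, hcur, show PySem.Chars.isspace ')' = false from by decide]
    by_cases h2 : c = '}'
    · subst h2
      rw [show (('}' :: s).flatMap pvF) = ' ' :: '}' :: ' ' :: s.flatMap pvF from by
            simp [pvF], go_space ' ' (by decide), go_char '}' (by decide),
          go_space ' ' (by decide), if_neg (by simp), ih]
      by_cases hcur : cur = [] <;>
        simp [pvM, pvFlush, hcur, show PySem.Chars.isspace '}' = false from by decide]
    by_cases h3 : c = '('
    · subst h3
      rw [show (('(' :: s).flatMap pvF) = '(' :: ' ' :: s.flatMap pvF from by simp [pvF],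
          go_char '(' (by decide), go_space ' ' (by decide), if_neg (by simp), ih]
      simp [pvM, show PySem.Chars.isspace '(' = false from by decide]
    by_cases h4 : c = '{'
    · subst h4
      rw [show (('{' :: s).flatMap pvF) = '{' :: ' ' :: s.flatMap pvF from by simp [pvF],
          go_char '{' (by decide), go_space ' ' (by decide), if_neg (by simp), ih]
      simp [pvM, show PySem.Chars.isspace '{' = false from by decide]
    · have hF : pvF c = [c] := by simp [pvF, h1, h2, h3, h4]
      rw [show ((c :: s).flatMap pvF) = c :: s.flatMap pvF from by simp [hF]]
      by_cases hc : PySem.Chars.isspace c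
      · rw [go_space c hc, ih]
        by_cases hcur : cur = [] <;> simp [pvM, pvFlush, hc, hcur]
      · rw [go_char c (by simpa using hc), ih]
        simp [pvM, hc, h1, h2, h3, h4]

-- ===== VERDICT (by name: the statement is the Claim_ definition above) =====
set_option maxHeartbeats 1000000 in
theorem tokenize_ccl_py_spec : Claim_equal_tokenize_ccl_py := by
  intro s _
  show tokenize_ccl_py s = tokenize_ccl_py_alt s
  unfold tokenize_ccl_py tokenize_ccl_py_alt PySem.Str.split₀
  rw [foldl_tokA,
    show PySem.Chars.split₀ s.toList = PySem.Chars.split₀.go s.toList [] [] from rfl,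
    split₀_go_scan s.toList [] []]
  simp only [List.reverse_nil, List.flatMap_nil, List.nil_append, List.foldl_nil]
  rw [show (PySem.Str.replace
        (PySem.Str.replace (PySem.Str.replace (PySem.Str.replace s ")" " ) ") "}" " } ")
          "(" "( ") "{" "{ ").toList
      = PySem.Chars.replace
          (PySem.Chars.replace
            (PySem.Chars.replace
              (PySem.Chars.replace s.toList [')'] [' ', ')', ' ']) ['}'] [' ', '}', ' '])
            ['('] ['(', ' ']) ['{'] ['{', ' '] from by
        simp [PySem.Str.toList_replace]]
  rw [rep4_eq_flatMap,
    show PySem.Chars.split₀ (s.toList.flatMap pvF)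
      = PySem.Chars.split₀.go (s.toList.flatMap pvF) [] [] from rfl,
    split₀_go_flatMap s.toList [] []]
  simp
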